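-- pv_equiv track=rewrite | github.com/PriyaMurali16/Coddy | DecodeMessage.py | decode_garden_message
-- ===== SOURCE A (Python) =====
-- def decode_garden_message(encoded_message, shift):
--     special_chars = {'!', '?', '.', ',', ':', ';'}
--     decoded_message = []
--     non_alpha_chars = []
--
--     for char in encoded_message:
--         if char.isalpha():
--             if char.isupper():
--                 base = ord('A')
--             else:
--                 base = ord('a')
--
--             decoded_char = chr((ord(char) - base + shift) % 26 + base)
--             decoded_message.append(decoded_char)
--         elif char in special_chars:
--             non_alpha_chars.reverse()
--             decoded_message.extend(non_alpha_chars)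
--             non_alpha_chars = []
--             decoded_message.append(char)
--         else:
--             non_alpha_chars.append(char)
--
--     decoded_message.extend(non_alpha_chars)
--
--     return ''.join(decoded_message)
-- ===== SOURCE B (Python) =====
-- def _shift_char(c, shift):
--     base = ord('A') if c.isupper() else ord('a')
--     return chr((ord(c) - base + shift) % 26 + base)
--
--
-- def decode_garden_message(encoded_message, shift):
--     specials = '!?.,:;'
--     # pass 1: split into (segment, delimiter) pairs plus a trailing segment
--     segments = []
--     cur = []
--     for ch in encoded_message:
--         if ch in specials:
--             segments.append((cur, ch))
--             cur = []
--         else: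
--             cur.append(ch)
--     # pass 2: per segment, shifted letters first, then the other chars reversed,
--     # then the delimiter; the trailing segment keeps its other chars un-reversed
--     out = []
--     for seg, delim in segments:
--         out.extend(_shift_char(c, shift) for c in seg if c.isalpha())
--         out.extend(reversed([c for c in seg if not c.isalpha()]))
--         out.append(delim)
--     out.extend(_shift_char(c, shift) for c in cur if c.isalpha())
--     out.extend(c for c in cur if not c.isalpha())
--     return ''.join(out)
-- ===== Notes on version B (the rewrite author's own statement) =====
-- stated objective: alternative
-- what changed: Replaces A's single stateful pass with a mutable buffer flushed at punctuation by a two-phase decomposition: first split the message into delimiter-terminated segments, then render each segment as shifted letters followed by its reversed (un-reversed for the trailing segment) non-letter characters.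
import Mathlib
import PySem

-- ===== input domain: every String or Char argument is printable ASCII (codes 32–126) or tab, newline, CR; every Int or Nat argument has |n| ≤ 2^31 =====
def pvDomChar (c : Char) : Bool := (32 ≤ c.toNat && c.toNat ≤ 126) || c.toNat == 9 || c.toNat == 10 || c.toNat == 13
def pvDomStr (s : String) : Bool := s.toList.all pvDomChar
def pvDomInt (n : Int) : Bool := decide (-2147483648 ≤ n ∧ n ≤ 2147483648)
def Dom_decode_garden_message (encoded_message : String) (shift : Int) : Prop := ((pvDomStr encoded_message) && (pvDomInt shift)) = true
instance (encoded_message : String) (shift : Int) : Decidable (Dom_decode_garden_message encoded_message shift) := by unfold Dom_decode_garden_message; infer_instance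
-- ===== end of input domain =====

-- B replaces A's single stateful buffer-flushing pass by a two-phase decomposition
-- (split into delimiter-terminated segments, then render each segment); objective: alternative.

-- ===== PORT A =====
def decode_garden_message (encoded_message : String) (shift : Int) : String :=
  let special_chars : List Char := ['!', '?', '.', ',', ':', ';']
  let st := encoded_message.toList.foldl
    (fun (st : List Char × List Char) char =>
      if PySem.Chars.isalpha char then
        let base : Int := if PySem.Chars.isupper char then ('A'.toNat : Int) else ('a'.toNat : Int)
        let decoded_char := Char.ofNat (PySem.Int.mod ((char.toNat : Int) - base + shift) 26 + base).toNat
        (st.1 ++ [decoded_char], st.2)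
      else if special_chars.contains char then
        (st.1 ++ st.2.reverse ++ [char], [])
      else
        (st.1, st.2 ++ [char]))
    ([], [])
  String.mk (st.1 ++ st.2)

-- ===== PORT B =====
def pyShiftChar (c : Char) (shift : Int) : Char :=
  let base : Int := if PySem.Chars.isupper c then ('A'.toNat : Int) else ('a'.toNat : Int)
  Char.ofNat (PySem.Int.mod ((c.toNat : Int) - base + shift) 26 + base).toNat

def decode_garden_message_alt (encoded_message : String) (shift : Int) : String :=
  let specials : List Char := "!?.,:;".toList
  -- pass 1: split into (segment, delimiter) pairs plus a trailing segment
  let sp := encoded_message.toList.foldl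
    (fun (st : List (List Char × Char) × List Char) ch =>
      if specials.contains ch then (st.1 ++ [(st.2, ch)], []) else (st.1, st.2 ++ [ch]))
    ([], [])
  -- pass 2: per segment: shifted letters, then other chars reversed, then delimiter
  let out := sp.1.foldl
    (fun (out : List Char) sd =>
      out ++ (sd.1.filter PySem.Chars.isalpha).map (fun c => pyShiftChar c shift)
          ++ (sd.1.filter (fun c => !PySem.Chars.isalpha c)).reverse
          ++ [sd.2])
    []
  String.mk (out ++ (sp.2.filter PySem.Chars.isalpha).map (fun c => pyShiftChar c shift)
                 ++ sp.2.filter (fun c => !PySem.Chars.isalpha c))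

-- ===== PRECONDITION & SPEC =====
def Spec_decode_garden_message (encoded_message : String) (shift : Int) (out : String) : Prop := out = decode_garden_message_alt encoded_message shift
instance (encoded_message : String) (shift : Int) (out : String) : Decidable (Spec_decode_garden_message encoded_message shift out) := by unfold Spec_decode_garden_message; infer_instance

-- ===== CLAIM (what is proved, stated in full; the proofs are below) =====
def Claim_equal_decode_garden_message : Prop := ∀ (encoded_message : String) (shift : Int), Dom_decode_garden_message encoded_message shift → Spec_decode_garden_message encoded_message shift (decode_garden_message encoded_message shift)

-- ===== LEMMAS AND PROOFS =====

def pvSpec (c : Char) : Bool := (['!', '?', '.', ',', ':', ';'] : List Char).contains c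

def pvLetters (shift : Int) (s : List Char) : List Char :=
  (s.filter PySem.Chars.isalpha).map (fun c => pyShiftChar c shift)

def pvOthers (s : List Char) : List Char := s.filter (fun c => !PySem.Chars.isalpha c)

-- A's loop step and B's two loop steps, named (zeta-reduced forms of the port lambdas)
def pvStepA (shift : Int) (st : List Char × List Char) (char : Char) : List Char × List Char :=
  if PySem.Chars.isalpha char then
    (st.1 ++ [Char.ofNat (PySem.Int.mod ((char.toNat : Int) - (if PySem.Chars.isupper char then ('A'.toNat : Int) else ('a'.toNat : Int)) + shift) 26 + (if PySem.Chars.isupper char then ('A'.toNat : Int) else ('a'.toNat : Int))).toNat], st.2)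
  else if pvSpec char then
    (st.1 ++ st.2.reverse ++ [char], [])
  else (st.1, st.2 ++ [char])

def pvStepSplit (st : List (List Char × Char) × List Char) (ch : Char) : List (List Char × Char) × List Char :=
  if pvSpec ch then (st.1 ++ [(st.2, ch)], []) else (st.1, st.2 ++ [ch])

def pvStepOut (shift : Int) (out : List Char) (sd : List Char × Char) : List Char :=
  out ++ (sd.1.filter PySem.Chars.isalpha).map (fun c => pyShiftChar c shift)
      ++ (sd.1.filter (fun c => !PySem.Chars.isalpha c)).reverse ++ [sd.2]

theorem portA_eq (encoded_message : String) (shift : Int) :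
    decode_garden_message encoded_message shift
    = String.mk ((encoded_message.toList.foldl (pvStepA shift) ([], [])).1
               ++ (encoded_message.toList.foldl (pvStepA shift) ([], [])).2) := rfl

theorem portB_eq (encoded_message : String) (shift : Int) :
    decode_garden_message_alt encoded_message shift
    = String.mk ((((encoded_message.toList.foldl pvStepSplit ([], [])).1).foldl (pvStepOut shift) [])
               ++ pvLetters shift (encoded_message.toList.foldl pvStepSplit ([], [])).2
               ++ pvOthers (encoded_message.toList.foldl pvStepSplit ([], [])).2) := rfl

-- A's semantics as a structural recursion: remaining input + current buffer, output suffix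
def pvF (shift : Int) : List Char -> List Char -> List Char
  | [], b => b
  | c :: r, b =>
    if PySem.Chars.isalpha c then pyShiftChar c shift :: pvF shift r b
    else if pvSpec c then b.reverse ++ c :: pvF shift r []
    else pvF shift r (b ++ [c])

-- B's split as a structural recursion
def pvSplit : List Char -> List Char -> List (List Char × Char) × List Char
  | [], cur => ([], cur)
  | c :: r, cur =>
    if pvSpec c then ((cur, c) :: (pvSplit r []).1, (pvSplit r []).2)
    else pvSplit r (cur ++ [c])

def pvRenderSeg (shift : Int) (sd : List Char × Char) : List Char :=
  pvLetters shift sd.1 ++ (pvOthers sd.1).reverse ++ [sd.2]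

def pvQ (shift : Int) (p : List (List Char × Char) × List Char) : List Char :=
  p.1.flatMap (pvRenderSeg shift) ++ pvLetters shift p.2 ++ pvOthers p.2

def pvP (shift : Int) (b : List Char) (cs : List Char) : List Char :=
  match pvSplit cs [] with
  | ((s, d) :: rest, t) =>
      pvLetters shift s ++ (pvOthers s).reverse ++ b.reverse ++ [d] ++ pvQ shift (rest, t)
  | ([], t) => pvLetters shift t ++ b ++ pvOthers t

theorem pvAlpha_not_spec (c : Char) (ha : PySem.Chars.isalpha c = true) : pvSpec c = false := by
  cases hsp : pvSpec c
  · rfl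
  · exfalso
    simp only [pvSpec, List.contains_eq_mem, List.mem_cons, List.not_mem_nil, or_false,
      decide_eq_true_eq] at hsp
    rcases hsp with rfl | rfl | rfl | rfl | rfl | rfl <;> exact absurd ha (by decide)

theorem pvStepA_alpha (shift : Int) (d b : List Char) (c : Char) (ha : PySem.Chars.isalpha c = true) :
    pvStepA shift (d, b) c = (d ++ [pyShiftChar c shift], b) := by
  simp [pvStepA, pyShiftChar, ha]

theorem pvStepA_special (shift : Int) (d b : List Char) (c : Char)
    (ha : PySem.Chars.isalpha c = false) (hs : pvSpec c = true) :
    pvStepA shift (d, b) c = (d ++ b.reverse ++ [c], []) := by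
  simp [pvStepA, ha, hs]

theorem pvStepA_other (shift : Int) (d b : List Char) (c : Char)
    (ha : PySem.Chars.isalpha c = false) (hs : pvSpec c = false) :
    pvStepA shift (d, b) c = (d, b ++ [c]) := by
  simp [pvStepA, ha, hs]

theorem pvA_fold (shift : Int) (cs : List Char) : ∀ (d b : List Char),
    (cs.foldl (pvStepA shift) (d, b)).1 ++ (cs.foldl (pvStepA shift) (d, b)).2
    = d ++ pvF shift cs b := by
  induction cs with
  | nil => intro d b; simp [pvF]
  | cons c r ih =>
    intro d b
    by_cases ha : PySem.Chars.isalpha c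
    · rw [List.foldl_cons, pvStepA_alpha shift d b c ha, ih]
      simp [pvF, ha]
    · have ha' : PySem.Chars.isalpha c = false := by simpa using ha
      by_cases hs : pvSpec c
      · rw [List.foldl_cons, pvStepA_special shift d b c ha' hs, ih]
        simp [pvF, ha', hs]
      · have hs' : pvSpec c = false := by simpa using hs
        rw [List.foldl_cons, pvStepA_other shift d b c ha' hs', ih]
        simp [pvF, ha', hs']

theorem pvSplit_fold (cs : List Char) : ∀ (segs : List (List Char × Char)) (cur : List Char),
    cs.foldl pvStepSplit (segs, cur) = (segs ++ (pvSplit cs cur).1, (pvSplit cs cur).2) := by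
  induction cs with
  | nil => intro segs cur; simp [pvSplit]
  | cons c r ih =>
    intro segs cur
    by_cases hs : pvSpec c
    · rw [List.foldl_cons, show pvStepSplit (segs, cur) c = (segs ++ [(cur, c)], []) from by
        simp [pvStepSplit, hs], ih]
      simp [pvSplit, hs]
    · rw [List.foldl_cons, show pvStepSplit (segs, cur) c = (segs, cur ++ [c]) from by
        simp [pvStepSplit, hs], ih]
      simp [pvSplit, hs]

theorem pvOut_fold (shift : Int) (segs : List (List Char × Char)) : ∀ (out : List Char),
    segs.foldl (pvStepOut shift) out = out ++ segs.flatMap (pvRenderSeg shift) := by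
  induction segs with
  | nil => intro out; simp
  | cons sd rest ih =>
    intro out
    rw [List.foldl_cons, List.flatMap_cons]
    show rest.foldl (pvStepOut shift) _ = _
    rw [ih]
    simp [pvStepOut, pvRenderSeg, pvLetters, pvOthers]

-- prepending cur to the input prepends it to the first segment (or the trailing run)
theorem pvSplit_cur (cs : List Char) : ∀ (cur : List Char),
    pvSplit cs cur = (match pvSplit cs [] with
      | ((s, d) :: rest, t) => ((cur ++ s, d) :: rest, t)
      | ([], t) => ([], cur ++ t)) := by
  induction cs with
  | nil => intro cur; simp [pvSplit]
  | cons c r ih =>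
    intro cur
    by_cases hs : pvSpec c
    · simp [pvSplit, hs]
    · simp only [pvSplit, hs, Bool.false_eq_true, if_false]
      simp only [List.nil_append]
      rw [ih (cur ++ [c]), ih [c]]
      rcases h : pvSplit r [] with ⟨segs, t⟩
      cases segs with
      | nil => simp
      | cons sd rest => rcases sd with ⟨s, d⟩; simp

theorem pvF_eq_P (shift : Int) (cs : List Char) : ∀ (b : List Char),
    pvF shift cs b = pvP shift b cs := by
  induction cs with
  | nil => intro b; simp [pvF, pvP, pvSplit, pvLetters, pvOthers]
  | cons c r ih =>
    intro b
    have hsplit : pvSplit (c :: r) [] = (if pvSpec c then ((([], c) : List Char × Char) :: (pvSplit r []).1, (pvSplit r []).2)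
        else (match pvSplit r [] with
          | ((s, d) :: rest, t) => (([c] ++ s, d) :: rest, t)
          | ([], t) => ([], [c] ++ t))) := by
      by_cases hs : pvSpec c
      · simp [pvSplit, hs]
      · simp only [pvSplit, hs, Bool.false_eq_true, if_false]
        simp only [List.nil_append]
        rw [pvSplit_cur r [c]]
    by_cases ha : PySem.Chars.isalpha c
    · have hns : pvSpec c = false := pvAlpha_not_spec c ha
      simp only [pvF, ha, if_pos]
      rw [ih b]
      simp only [pvP, hsplit, hns, Bool.false_eq_true, if_false]
      rcases h : pvSplit r [] with ⟨segs, t⟩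
      cases segs with
      | nil => simp [pvLetters, pvOthers, ha]
      | cons sd rest =>
        rcases sd with ⟨s, d⟩
        simp [pvLetters, pvOthers, ha]
    · by_cases hs : pvSpec c
      · simp only [pvF, ha, Bool.false_eq_true, if_false, hs, if_pos]
        rw [ih []]
        simp only [pvP, hsplit, hs, if_pos]
        rcases h : pvSplit r [] with ⟨segs, t⟩
        cases segs with
        | nil => simp [pvQ, pvLetters, pvOthers]
        | cons sd rest =>
          rcases sd with ⟨s, d⟩
          simp [pvQ, pvRenderSeg, pvLetters, pvOthers]
      · simp only [pvF, ha, Bool.false_eq_true, if_false, hs]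
        rw [ih (b ++ [c])]
        simp only [pvP, hsplit, hs, Bool.false_eq_true, if_false]
        rcases h : pvSplit r [] with ⟨segs, t⟩
        cases segs with
        | nil => simp [pvLetters, pvOthers, ha]
        | cons sd rest =>
          rcases sd with ⟨s, d⟩
          simp [pvLetters, pvOthers, ha]

theorem pvP_nil_eq_Q (shift : Int) (cs : List Char) :
    pvP shift [] cs = pvQ shift (pvSplit cs []) := by
  rcases h : pvSplit cs [] with ⟨segs, t⟩
  cases segs with
  | nil => simp [pvP, pvQ, h]
  | cons sd rest =>
    rcases sd with ⟨s, d⟩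
    simp [pvP, pvQ, h, pvRenderSeg]

-- ===== VERDICT (by name: the statement is the Claim_ definition above) =====
theorem decode_garden_message_spec : Claim_equal_decode_garden_message := by
  intro encoded_message shift _
  show decode_garden_message encoded_message shift = decode_garden_message_alt encoded_message shift
  rw [portA_eq, portB_eq, pvSplit_fold encoded_message.toList [] [], pvOut_fold shift]
  have hA := pvA_fold shift encoded_message.toList [] []
  simp only [List.nil_append] at hA
  rw [hA, pvF_eq_P, pvP_nil_eq_Q]
  rcases h : pvSplit encoded_message.toList [] with ⟨segs, t⟩
  simp [pvQ]
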